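-- pv_equiv track=rewrite | github.com/Sooyong97/Algorithm | 프로그래머스/1/131128. 숫자 짝꿍/숫자 짝꿍.py | solution
-- ===== SOURCE A (Python) =====
-- def solution(X, Y):
--     answer = ''
--
--     for i in range(9, -1, -1):
--         count_x = X.count(str(i))
--         count_y = Y.count(str(i))
--
--         answer += str(i) * min(count_x, count_y)
--
--     if not answer:
--         return "-1"
--
--     if answer[0] == "0":
--         return "0"
--
--     return answer
-- ===== SOURCE B (Python) =====
-- def solution(X, Y):
--     xs = sorted((c for c in X if c.isdigit()), reverse=True)
--     ys = sorted((c for c in Y if c.isdigit()), reverse=True)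
--     res = []
--     i = 0
--     j = 0
--     while i < len(xs) and j < len(ys):
--         if xs[i] == ys[j]:
--             res.append(xs[i])
--             i += 1
--             j += 1
--         elif xs[i] > ys[j]:
--             i += 1
--         else:
--             j += 1
--     if not res:
--         return "-1"
--     if res[0] == '0':
--         return "0"
--     return ''.join(res)
-- ===== Notes on version B (the rewrite author's own statement) =====
-- stated objective: alternative
-- what changed: A makes ten per-digit substring-count passes over both strings and concatenates replicate blocks; B extracts the digit characters once, sorts each sequence descending, and a two-pointer merge keeps the common multiset directly in 9-to-0 order.
import Mathlib
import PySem

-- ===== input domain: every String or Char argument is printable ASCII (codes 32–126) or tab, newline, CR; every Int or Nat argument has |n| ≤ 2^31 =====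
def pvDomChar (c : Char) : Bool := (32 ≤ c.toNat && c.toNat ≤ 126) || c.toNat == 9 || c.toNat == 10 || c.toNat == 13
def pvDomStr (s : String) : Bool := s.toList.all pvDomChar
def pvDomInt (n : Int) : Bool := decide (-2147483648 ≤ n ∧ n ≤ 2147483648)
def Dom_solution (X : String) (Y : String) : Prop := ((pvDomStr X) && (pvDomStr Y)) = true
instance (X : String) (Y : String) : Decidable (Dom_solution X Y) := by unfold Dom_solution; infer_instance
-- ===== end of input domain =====

-- B replaces A's ten per-digit count passes by sorting both digit sequences descending and
-- running a two-pointer merge that keeps the common multiset (objective: alternative).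

-- ===== PORT A =====
def solution (X : String) (Y : String) : String :=
  let answer : List Char :=
    (PySem.List.pyRange 9 (-1) (-1)).foldl (fun answer i =>
      let count_x : Int := (PySem.Chars.count X.toList (PySem.Int.toChars i) : Int)
      let count_y : Int := (PySem.Chars.count Y.toList (PySem.Int.toChars i) : Int)
      answer ++ PySem.List.pyRepeat (PySem.Int.toChars i) (min count_x count_y)) []
  if answer = [] then "-1"
  else if PySem.List.pyGet? answer 0 = some '0' then "0"
  else String.ofList answer

-- ===== PORT B =====
-- the two-pointer while loop of Source B: equal heads are kept, otherwise the larger head is skipped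
def mergeCommon : List Char → List Char → List Char
  | [], _ => []
  | _, [] => []
  | x :: xs, y :: ys =>
    if x = y then x :: mergeCommon xs ys
    else if y < x then mergeCommon xs (y :: ys)
    else mergeCommon (x :: xs) ys
termination_by a b => a.length + b.length

def solution_alt (X : String) (Y : String) : String :=
  let xs := PySem.List.sorted (X.toList.filter PySem.Chars.isdigit) (fun c => c) true
  let ys := PySem.List.sorted (Y.toList.filter PySem.Chars.isdigit) (fun c => c) true
  let res := mergeCommon xs ys
  if res = [] then "-1"
  else if PySem.List.pyGet? res 0 = some '0' then "0"
  else String.ofList res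

-- ===== PRECONDITION & SPEC =====
def Spec_solution (X : String) (Y : String) (out : String) : Prop := out = solution_alt X Y
instance (X : String) (Y : String) (out : String) : Decidable (Spec_solution X Y out) := by unfold Spec_solution; infer_instance

-- ===== CLAIM (what is proved, stated in full; the proofs are below) =====
def Claim_equal_solution : Prop := ∀ (X : String) (Y : String), Dom_solution X Y → Spec_solution X Y (solution X Y)

-- ===== LEMMAS AND PROOFS =====

-- the ten digit characters in the order A emits them
def pvDigits : List Char := ['9','8','7','6','5','4','3','2','1','0']

-- s.count(d) for a single character d is the character count
theorem pvCountGo (c : Char) : ∀ (fuel : Nat) (s : List Char) (acc : Nat), s.length ≤ fuel →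
    PySem.Chars.count.go [c] fuel s acc = acc + s.count c := by
  intro fuel
  induction fuel with
  | zero =>
    intro s acc h
    cases s with
    | nil => simp [PySem.Chars.count.go]
    | cons hd t => simp at h
  | succ n ih =>
    intro s acc h
    cases s with
    | nil => simp [PySem.Chars.count.go]
    | cons hd t =>
      rw [PySem.Chars.count.go]
      by_cases hc : c = hd
      · subst hc
        simp [List.isPrefixOf, ih t (acc+1) (by simpa using h)]
        omega
      · simp [List.isPrefixOf, Ne.symm hc, hc, ih t acc (by simpa using h)]

theorem pvCountSingleton (cs : List Char) (c : Char) : PySem.Chars.count cs [c] = cs.count c := by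
  simp [PySem.Chars.count, pvCountGo c cs.length cs 0 le_rfl]

theorem pvMinToNat (a b : Nat) : (min (a : Int) (b : Int)).toNat = min a b := by omega

-- A's loop produces the block-of-replicates list over the digits 9..0
theorem pvAcore (X Y : String) :
    (PySem.List.pyRange 9 (-1) (-1)).foldl (fun answer i =>
      answer ++ PySem.List.pyRepeat (PySem.Int.toChars i)
        (min ((PySem.Chars.count X.toList (PySem.Int.toChars i) : Nat) : Int)
             ((PySem.Chars.count Y.toList (PySem.Int.toChars i) : Nat) : Int))) []
    = pvDigits.flatMap (fun d => List.replicate (min (X.toList.count d) (Y.toList.count d)) d) := by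
  have hr : PySem.List.pyRange 9 (-1) (-1) = [9,8,7,6,5,4,3,2,1,0] := by decide
  have h9 : PySem.Int.toChars 9 = ['9'] := by decide
  have h8 : PySem.Int.toChars 8 = ['8'] := by decide
  have h7 : PySem.Int.toChars 7 = ['7'] := by decide
  have h6 : PySem.Int.toChars 6 = ['6'] := by decide
  have h5 : PySem.Int.toChars 5 = ['5'] := by decide
  have h4 : PySem.Int.toChars 4 = ['4'] := by decide
  have h3 : PySem.Int.toChars 3 = ['3'] := by decide
  have h2 : PySem.Int.toChars 2 = ['2'] := by decide
  have h1 : PySem.Int.toChars 1 = ['1'] := by decide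
  have h0 : PySem.Int.toChars 0 = ['0'] := by decide
  simp [hr, h9, h8, h7, h6, h5, h4, h3, h2, h1, h0, PySem.List.pyRepeat_singleton,
    pvCountSingleton, pvMinToNat, pvDigits]

-- counting in a flatMap of replicate blocks over distinct block letters
theorem pvCountFlatMap (f : Char → Nat) :
    ∀ (ds : List Char), ds.Nodup → ∀ (c : Char),
      (ds.flatMap (fun d => List.replicate (f d) d)).count c = if c ∈ ds then f c else 0 := by
  intro ds
  induction ds with
  | nil => simp
  | cons d t ih =>
    intro hnd c
    simp only [List.flatMap_cons, List.count_append, List.count_replicate,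
      ih hnd.of_cons c, List.mem_cons]
    by_cases hc : c = d
    · subst hc
      simp [List.Nodup.notMem hnd]
    · simp [hc, Ne.symm hc]

-- blocks over strictly decreasing letters are sorted descending
theorem pvPairwiseFlatMap (f : Char → Nat) :
    ∀ (ds : List Char), ds.Pairwise (· > ·) →
      (ds.flatMap (fun d => List.replicate (f d) d)).Pairwise (fun a b => b ≤ a) := by
  intro ds
  induction ds with
  | nil => simp
  | cons d t ih =>
    intro hp
    rw [List.flatMap_cons, List.pairwise_append]
    refine ⟨List.pairwise_replicate.mpr (Or.inr le_rfl), ih hp.of_cons, ?_⟩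
    intro x hx y hy
    obtain ⟨rfl, -⟩ := List.eq_of_mem_replicate hx
    obtain ⟨d', hd', hy'⟩ := List.mem_flatMap.mp hy
    obtain ⟨rfl, -⟩ := List.eq_of_mem_replicate hy'
    exact le_of_lt (List.rel_of_pairwise_cons hp hd')

theorem pvMergeSublist : ∀ (a b : List Char), (mergeCommon a b).Sublist a := by
  intro a b
  fun_induction mergeCommon a b with
  | case1 => simp
  | case2 => simp
  | case3 x xs ys ih => exact List.Sublist.cons₂ _ ih
  | case4 x xs y ys h h2 ih => exact ih.trans (List.sublist_cons_self _ _)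
  | case5 x xs y ys h h2 ih => exact ih

theorem pvMergeCount : ∀ (a b : List Char), a.Pairwise (fun p q => q ≤ p) →
    b.Pairwise (fun p q => q ≤ p) → ∀ (c : Char),
    (mergeCommon a b).count c = min (a.count c) (b.count c) := by
  intro a b
  fun_induction mergeCommon a b with
  | case1 b => intro _ _ c; simp
  | case2 a h => intro _ _ c; simp
  | case3 xs x ys ih =>
    intro ha hb c
    simp only [List.count_cons, ih ha.of_cons hb.of_cons c]
    omega
  | case4 x xs y ys hne hlt ih =>
    intro ha hb c
    have hx0 : (y :: ys).count x = 0 := by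
      refine List.count_eq_zero.mpr ?_
      intro hmem
      rcases List.mem_cons.mp hmem with h | h
      · exact hne h
      · exact absurd (List.rel_of_pairwise_cons hb h) (not_le.mpr hlt)
    rw [ih ha.of_cons hb c]
    rcases eq_or_ne c x with rfl | hc
    · rw [hx0]
      simp
    · rw [List.count_cons_of_ne (Ne.symm hc)]
  | case5 x xs y ys hne hnlt ih =>
    intro ha hb c
    have hlt : x < y := lt_of_le_of_ne (not_lt.mp hnlt) hne
    have hy0 : (x :: xs).count y = 0 := by
      refine List.count_eq_zero.mpr ?_
      intro hmem
      rcases List.mem_cons.mp hmem with h | h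
      · exact hne h.symm
      · exact absurd (List.rel_of_pairwise_cons ha h) (not_le.mpr hlt)
    rw [ih ha hb.of_cons c]
    rcases eq_or_ne c y with rfl | hc
    · rw [hy0]
      simp
    · rw [List.count_cons_of_ne (Ne.symm hc)]

theorem pvCharOfToNat (c : Char) (n : Nat) (h : c.toNat = n) : c = Char.ofNat n := by
  rw [← h, Char.ofNat_toNat]

theorem pvMemDigits (c : Char) : c ∈ pvDigits ↔ PySem.Chars.isdigit c = true := by
  constructor
  · intro h
    fin_cases h <;> decide
  · intro h
    simp only [PySem.Chars.isdigit, Bool.and_eq_true, decide_eq_true_eq] at h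
    have h1 : 48 ≤ c.toNat := h.1
    have h2 : c.toNat ≤ 57 := h.2
    have : c.toNat = 48 ∨ c.toNat = 49 ∨ c.toNat = 50 ∨ c.toNat = 51 ∨ c.toNat = 52 ∨
        c.toNat = 53 ∨ c.toNat = 54 ∨ c.toNat = 55 ∨ c.toNat = 56 ∨ c.toNat = 57 := by omega
    rcases this with h|h|h|h|h|h|h|h|h|h <;> rw [pvCharOfToNat c _ h] <;> decide

-- the central equality: A's block list IS B's two-pointer merge of the sorted digit lists
theorem pvCore (X Y : String) :
    pvDigits.flatMap (fun d => List.replicate (min (X.toList.count d) (Y.toList.count d)) d)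
    = mergeCommon (PySem.List.sorted (X.toList.filter PySem.Chars.isdigit) (fun c => c) true)
                  (PySem.List.sorted (Y.toList.filter PySem.Chars.isdigit) (fun c => c) true) := by
  set xs := PySem.List.sorted (X.toList.filter PySem.Chars.isdigit) (fun c => c) true with hxs
  set ys := PySem.List.sorted (Y.toList.filter PySem.Chars.isdigit) (fun c => c) true with hys
  have hxp : xs.Pairwise (fun p q => q ≤ p) := PySem.List.sorted_pairwise_rev _ _
  have hyp : ys.Pairwise (fun p q => q ≤ p) := PySem.List.sorted_pairwise_rev _ _
  have hnd : pvDigits.Nodup := by decide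
  have hgt : pvDigits.Pairwise (· > ·) := by decide
  -- counts agree everywhere
  have hcount : ∀ c, (pvDigits.flatMap
      (fun d => List.replicate (min (X.toList.count d) (Y.toList.count d)) d)).count c
      = (mergeCommon xs ys).count c := by
    intro c
    rw [pvMergeCount xs ys hxp hyp c,
      (PySem.List.sorted_perm _ _ _).count_eq, (PySem.List.sorted_perm _ _ _).count_eq,
      pvCountFlatMap _ pvDigits hnd c]
    by_cases hd : PySem.Chars.isdigit c = true
    · rw [if_pos ((pvMemDigits c).mpr hd), List.count_filter hd, List.count_filter hd]
    · rw [if_neg (fun hm => hd ((pvMemDigits c).mp hm))]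
      have : (X.toList.filter PySem.Chars.isdigit).count c = 0 := by
        refine List.count_eq_zero.mpr (fun hm => hd (List.of_mem_filter hm))
      simp [this]
  -- both sides sorted descending, equal counts ⇒ equal
  refine List.Perm.eq_of_pairwise (le := fun p q => q ≤ p)
    (fun a b _ _ h1 h2 => le_antisymm h2 h1)
    (pvPairwiseFlatMap _ pvDigits hgt)
    (hxp.sublist (pvMergeSublist xs ys))
    (List.perm_iff_count.mpr hcount)

-- ===== VERDICT (by name: the statement is the Claim_ definition above) =====
theorem solution_spec : Claim_equal_solution := by
  intro X Y _
  unfold Spec_solution solution solution_alt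
  rw [pvAcore X Y, pvCore X Y]
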